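-- pv_equiv track=rewrite | github.com/kamalrao2005/Ai | monkeyban.py | bfs
-- ===== SOURCE A (Python) =====
-- from collections import deque
--
-- def is_goal(st):
--     return st[3] == True
--
-- def succ(st):
--     res = []
--     m_pos, m_h, b_pos, has_b = st
--     if m_h == 'on_floor':
--         for p in ['door', 'middle', 'window']:
--             if p != m_pos:
--                 res.append(((p, m_h, b_pos, has_b),
--                             f"Monkey walks to {p}"))
--     if m_h == 'on_floor' and m_pos == b_pos:
--         for p in ['door', 'middle', 'window']:
--             if p != b_pos:
--                 res.append(((p, m_h, p, has_b),
--                             f"Monkey pushes box to {p}"))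
--         res.append(((m_pos, 'on_box', b_pos, has_b),
--                     "Monkey climbs onto the box"))
--     if m_h == 'on_box' and m_pos == 'middle':
--         res.append(((m_pos, m_h, b_pos, True),
--                     "Monkey grabs the banana"))
--     return res
--
-- def bfs(init_st):
--     q = deque([(init_st, [])])
--     vis = set()
--     while q:
--         st, path = q.popleft()
--         if is_goal(st):
--             return path
--         if st in vis:
--             continue
--         vis.add(st)
--         for nxt, act in succ(st):
--             q.append((nxt, path + [act]))
--     return None
-- ===== SOURCE B (Python) =====
-- from collections import deque
--
-- def is_goal(st):
--     return st[3] == True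
--
-- def succ(st):
--     res = []
--     m_pos, m_h, b_pos, has_b = st
--     if m_h == 'on_floor':
--         for p in ['door', 'middle', 'window']:
--             if p != m_pos:
--                 res.append(((p, m_h, b_pos, has_b),
--                             f"Monkey walks to {p}"))
--     if m_h == 'on_floor' and m_pos == b_pos:
--         for p in ['door', 'middle', 'window']:
--             if p != b_pos:
--                 res.append(((p, m_h, p, has_b),
--                             f"Monkey pushes box to {p}"))
--         res.append(((m_pos, 'on_box', b_pos, has_b),
--                     "Monkey climbs onto the box"))
--     if m_h == 'on_box' and m_pos == 'middle':
--         res.append(((m_pos, m_h, b_pos, True),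
--                     "Monkey grabs the banana"))
--     return res
--
-- def bfs(init_st):
--     q = deque([init_st])
--     came_from = {init_st: None}
--     while q:
--         st = q.popleft()
--         if is_goal(st):
--             path = []
--             cur = st
--             while came_from[cur] is not None:
--                 prev, act = came_from[cur]
--                 path.append(act)
--                 cur = prev
--             path.reverse()
--             return path
--         for nxt, act in succ(st):
--             if nxt not in came_from:
--                 came_from[nxt] = (st, act)
--                 q.append(nxt)
--     return None
-- ===== Notes on version B (the rewrite author's own statement) =====
-- stated objective: alternative
-- what changed: BFS queue holds bare states with a came_from map (state -> (parent, action)) recording first discovery; the action path is reconstructed once by walking came_from backwards at the goal, instead of carrying and copying a full action list with every queue entry and filtering duplicates at pop time via a visited set.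
import Mathlib
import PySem

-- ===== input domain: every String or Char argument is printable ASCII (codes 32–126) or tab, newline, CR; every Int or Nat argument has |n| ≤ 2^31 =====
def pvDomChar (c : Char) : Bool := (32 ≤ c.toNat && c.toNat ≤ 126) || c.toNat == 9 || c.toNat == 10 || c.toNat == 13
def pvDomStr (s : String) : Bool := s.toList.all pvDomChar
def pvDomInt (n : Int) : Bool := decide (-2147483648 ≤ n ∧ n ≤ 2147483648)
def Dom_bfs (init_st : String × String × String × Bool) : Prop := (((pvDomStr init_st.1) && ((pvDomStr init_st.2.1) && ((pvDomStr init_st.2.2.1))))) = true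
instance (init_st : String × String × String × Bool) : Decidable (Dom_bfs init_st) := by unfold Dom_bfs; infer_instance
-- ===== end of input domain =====

-- B changes the data structure: the queue holds bare states and a came_from map reconstructs the
-- path once at the goal, instead of carrying a full action list alongside every queue entry.

-- shared module helpers (Python B calls the module's is_goal and succ unchanged)
def pvStGoal (st : String × String × String × Bool) : Bool := st.2.2.2

def pvStSucc (st : String × String × String × Bool) :
    List ((String × String × String × Bool) × String) :=
  match st with
  | (m_pos, m_h, b_pos, has_b) =>
    (if m_h = "on_floor" then
      (List.filter (fun p => decide (p ≠ m_pos)) ["door", "middle", "window"]).map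
        (fun p => ((p, m_h, b_pos, has_b), "Monkey walks to " ++ p))
     else []) ++
    (if m_h = "on_floor" ∧ m_pos = b_pos then
      ((List.filter (fun p => decide (p ≠ b_pos)) ["door", "middle", "window"]).map
        (fun p => ((p, m_h, p, has_b), "Monkey pushes box to " ++ p))) ++
      [((m_pos, "on_box", b_pos, has_b), "Monkey climbs onto the box")]
     else []) ++
    (if m_h = "on_box" ∧ m_pos = "middle" then
      [((m_pos, m_h, b_pos, true), "Monkey grabs the banana")]
     else [])

-- ===== PORT A =====
-- the while loop of A: queue of (state, path), visited set (as its list of distinct elements);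
-- fuel 1000 is a totality guard only: the visited check bounds expansions by the at most 64
-- states reachable from any init, so fewer than 1 + 64*7 < 1000 pops ever occur
def pvLoopA : Nat → List ((String × String × String × Bool) × List String) →
    List (String × String × String × Bool) → Option (List String)
  | 0, _, _ => none
  | _ + 1, [], _ => none
  | f + 1, (st, path) :: rest, vis =>
    if pvStGoal st then some path
    else if st ∈ vis then pvLoopA f rest vis
    else pvLoopA f (rest ++ (pvStSucc st).map (fun na => (na.1, path ++ [na.2]))) (st :: vis)

def bfs (init_st : String × String × String × Bool) : Option (List String) :=
  pvLoopA 1000 [(init_st, [])] []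

-- ===== PORT B =====
-- came_from association list: state ↦ none (the root) or some (parent, action)
def pvCfGet : List ((String × String × String × Bool) × Option ((String × String × String × Bool) × String)) →
    (String × String × String × Bool) → Option (Option ((String × String × String × Bool) × String))
  | [], _ => none
  | (k, v) :: rest, s => if k = s then some v else pvCfGet rest s

-- walk came_from backwards collecting actions, then reverse (fuel is a totality guard)
def pvBacktrack : Nat → (String × String × String × Bool) →
    List ((String × String × String × Bool) × Option ((String × String × String × Bool) × String)) →
    List String → List String
  | 0, _, _, path => path.reverse
  | f + 1, cur, cf, path =>
    match pvCfGet cf cur with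
    | some (some (prev, act)) => pvBacktrack f prev cf (path ++ [act])
    | _ => path.reverse

def pvLoopB : Nat → List (String × String × String × Bool) →
    List ((String × String × String × Bool) × Option ((String × String × String × Bool) × String)) →
    Option (List String)
  | 0, _, _ => none
  | _ + 1, [], _ => none
  | f + 1, st :: rest, cf =>
    if pvStGoal st then some (pvBacktrack 1000 st cf [])
    else
      let step := (pvStSucc st).foldl
        (fun acc na =>
          if (pvCfGet acc.2 na.1).isSome then acc
          else (acc.1 ++ [na.1], acc.2 ++ [(na.1, some (st, na.2))]))
        (rest, cf)
      pvLoopB f step.1 step.2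

def bfs_alt (init_st : String × String × String × Bool) : Option (List String) :=
  pvLoopB 1000 [init_st] [(init_st, none)]

-- ===== PRECONDITION & SPEC =====
def Spec_bfs (init_st : String × String × String × Bool) (out : Option (List String)) : Prop := out = bfs_alt init_st
instance (init_st : String × String × String × Bool) (out : Option (List String)) : Decidable (Spec_bfs init_st out) := by unfold Spec_bfs; infer_instance

-- ===== CLAIM (what is proved, stated in full; the proofs are below) =====
def Claim_equal_bfs : Prop := ∀ (init_st : String × String × String × Bool), Dom_bfs init_st → Spec_bfs init_st (bfs init_st)

-- ===== LEMMAS AND PROOFS =====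

-- Both searches only ever compare position strings with each other and with the three literals
-- "door"/"middle"/"window", and never put a position into an action except those literals.  So both
-- are invariant under any injective renaming of positions fixing these literals; that reduces every
-- input to one of finitely many canonical literal inputs, which `decide` settles.

def pvRn (f : String → String) (st : String × String × String × Bool) :
    String × String × String × Bool :=
  (f st.1, st.2.1, f st.2.2.1, st.2.2.2)

theorem pvRn_inj {f : String → String} (hf : Function.Injective f) :
    Function.Injective (pvRn f) := by
  rintro ⟨a1, a2, a3, a4⟩ ⟨b1, b2, b3, b4⟩ h
  simp only [pvRn, Prod.mk.injEq] at h ⊢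
  exact ⟨hf h.1, h.2.1, hf h.2.2.1, h.2.2.2⟩

theorem pvStSucc_rn (f : String → String) (hd : f "door" = "door") (hm : f "middle" = "middle")
    (hw : f "window" = "window") (hf : Function.Injective f)
    (st : String × String × String × Bool) :
    pvStSucc (pvRn f st) = (pvStSucc st).map (fun na => (pvRn f na.1, na.2)) := by
  obtain ⟨mp, mh, bp, hb⟩ := st
  have hfix : ∀ p ∈ (["door", "middle", "window"] : List String), f p = p := by
    intro p hp
    simp only [List.mem_cons, List.not_mem_nil, or_false] at hp
    rcases hp with rfl | rfl | rfl
    · exact hd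
    · exact hm
    · exact hw
  have F : ∀ x : String,
      (List.filter (fun p => decide (p ≠ f x)) ["door", "middle", "window"]) =
        List.filter (fun p => decide (p ≠ x)) ["door", "middle", "window"] := by
    intro x
    refine List.filter_congr ?_
    intro p hp
    have hfp := hfix p hp
    have key : (p = f x) ↔ (p = x) := by
      constructor
      · intro h; exact hf (hfp.trans h)
      · intro h; subst h; exact hfp.symm
    simp only [decide_eq_decide, Ne, not_iff_not]
    exact key
  have e4 : (f mp = "middle") ↔ (mp = "middle") := by
    rw [← hm, hf.eq_iff, hm]
  show pvStSucc (f mp, mh, f bp, hb) = _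
  simp only [pvStSucc, List.map_append,
    apply_ite (List.map (fun na : (String × String × String × Bool) × String =>
      (pvRn f na.1, na.2))), List.map_nil, hf.eq_iff, e4, F]
  congr 1
  · congr 1
    · by_cases h1 : mh = "on_floor"
      · rw [if_pos h1, if_pos h1, List.map_map]
        refine List.map_congr_left ?_
        intro p hp
        have hfp := hfix p (List.mem_of_mem_filter hp)
        simp [pvRn, hfp]
      · rw [if_neg h1, if_neg h1]
    · by_cases h2 : mh = "on_floor" ∧ mp = bp
      · rw [if_pos h2, if_pos h2, List.map_map]
        congr 1
        refine List.map_congr_left ?_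
        intro p hp
        have hfp := hfix p (List.mem_of_mem_filter hp)
        simp [pvRn, hfp]
      · rw [if_neg h2, if_neg h2]

theorem pvLoopA_rn (f : String → String) (hd : f "door" = "door") (hm : f "middle" = "middle")
    (hw : f "window" = "window") (hf : Function.Injective f) :
    ∀ (fuel : Nat) (q : List ((String × String × String × Bool) × List String))
      (vis : List (String × String × String × Bool)),
      pvLoopA fuel (q.map (fun e => (pvRn f e.1, e.2))) (vis.map (pvRn f)) =
        pvLoopA fuel q vis := by
  intro fuel
  induction fuel with
  | zero => intro q vis; rfl
  | succ n ih =>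
    intro q vis
    cases q with
    | nil => rfl
    | cons e rest =>
      obtain ⟨st, path⟩ := e
      have hmem : (pvRn f st ∈ vis.map (pvRn f)) ↔ (st ∈ vis) :=
        List.mem_map_of_injective (pvRn_inj hf)
      simp only [List.map_cons, pvLoopA]
      have hg : pvStGoal (pvRn f st) = pvStGoal st := rfl
      rw [hg]
      by_cases hgoal : pvStGoal st = true
      · simp [hgoal]
      · simp only [hgoal, Bool.false_eq_true, if_false]
        by_cases hv : st ∈ vis
        · rw [if_pos (hmem.mpr hv), if_pos hv]; exact ih rest vis
        · rw [if_neg (fun h => hv (hmem.mp h)), if_neg hv]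
          have : (rest.map (fun e => (pvRn f e.1, e.2))) ++
              (pvStSucc (pvRn f st)).map (fun na => (na.1, path ++ [na.2])) =
              ((rest ++ (pvStSucc st).map (fun na => (na.1, path ++ [na.2]))).map
                (fun e => (pvRn f e.1, e.2))) := by
            rw [pvStSucc_rn f hd hm hw hf, List.map_append, List.map_map, List.map_map]
            simp [Function.comp]
          rw [this, show (pvRn f st :: vis.map (pvRn f)) = (st :: vis).map (pvRn f) from rfl]
          exact ih _ _

def pvRnCf (f : String → String) :
    List ((String × String × String × Bool) × Option ((String × String × String × Bool) × String)) →
    List ((String × String × String × Bool) × Option ((String × String × String × Bool) × String)) :=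
  List.map (fun e => (pvRn f e.1, e.2.map (fun pa => (pvRn f pa.1, pa.2))))

theorem pvCfGet_rn (f : String → String) (hf : Function.Injective f)
    (cf : List ((String × String × String × Bool) × Option ((String × String × String × Bool) × String)))
    (s : String × String × String × Bool) :
    pvCfGet (pvRnCf f cf) (pvRn f s) =
      (pvCfGet cf s).map (fun v => v.map (fun pa => (pvRn f pa.1, pa.2))) := by
  induction cf with
  | nil => rfl
  | cons e rest ih =>
    obtain ⟨k, v⟩ := e
    simp only [pvRnCf, List.map_cons, pvCfGet]
    by_cases hk : k = s
    · rw [if_pos (by rw [hk]), if_pos hk]; rfl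
    · rw [if_neg (fun h => hk (pvRn_inj hf h)), if_neg hk]; exact ih

theorem pvBacktrack_rn (f : String → String) (hf : Function.Injective f) :
    ∀ (fuel : Nat) (cur : String × String × String × Bool)
      (cf : List ((String × String × String × Bool) × Option ((String × String × String × Bool) × String)))
      (path : List String),
      pvBacktrack fuel (pvRn f cur) (pvRnCf f cf) path = pvBacktrack fuel cur cf path := by
  intro fuel
  induction fuel with
  | zero => intro cur cf path; rfl
  | succ n ih =>
    intro cur cf path
    simp only [pvBacktrack, pvCfGet_rn f hf]
    cases hv : pvCfGet cf cur with
    | none => rfl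
    | some v =>
      cases v with
      | none => rfl
      | some pa => exact ih pa.1 cf (path ++ [pa.2])

theorem pvLoopB_rn (f : String → String) (hd : f "door" = "door") (hm : f "middle" = "middle")
    (hw : f "window" = "window") (hf : Function.Injective f) :
    ∀ (fuel : Nat) (q : List (String × String × String × Bool))
      (cf : List ((String × String × String × Bool) × Option ((String × String × String × Bool) × String))),
      pvLoopB fuel (q.map (pvRn f)) (pvRnCf f cf) = pvLoopB fuel q cf := by
  intro fuel
  induction fuel with
  | zero => intro q cf; rfl
  | succ n ih =>
    intro q cf
    cases q with
    | nil => rfl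
    | cons st rest =>
      simp only [List.map_cons, pvLoopB]
      have hg : pvStGoal (pvRn f st) = pvStGoal st := rfl
      rw [hg]
      by_cases hgoal : pvStGoal st = true
      · rw [if_pos hgoal, if_pos hgoal, pvBacktrack_rn f hf]
      · rw [if_neg hgoal, if_neg hgoal]
        -- the discovery foldl commutes with the renaming
        have hfold : ∀ (l : List ((String × String × String × Bool) × String))
            (accq : List (String × String × String × Bool))
            (accc : List ((String × String × String × Bool) × Option ((String × String × String × Bool) × String))),
            (l.map (fun na : (String × String × String × Bool) × String => (pvRn f na.1, na.2))).foldl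
              (fun acc na =>
                if (pvCfGet acc.2 na.1).isSome then acc
                else (acc.1 ++ [na.1], acc.2 ++ [(na.1, some (pvRn f st, na.2))]))
              (accq.map (pvRn f), pvRnCf f accc) =
            ((l.foldl (fun acc na =>
                if (pvCfGet acc.2 na.1).isSome then acc
                else (acc.1 ++ [na.1], acc.2 ++ [(na.1, some (st, na.2))])) (accq, accc)).1.map (pvRn f),
             pvRnCf f ((l.foldl (fun acc na =>
                if (pvCfGet acc.2 na.1).isSome then acc
                else (acc.1 ++ [na.1], acc.2 ++ [(na.1, some (st, na.2))])) (accq, accc)).2)) := by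
          intro l
          induction l with
          | nil => intro accq accc; rfl
          | cons na tl ihl =>
            intro accq accc
            simp only [List.map_cons, List.foldl_cons]
            rw [pvCfGet_rn f hf, Option.isSome_map]
            by_cases hs : (pvCfGet accc na.1).isSome = true
            · rw [if_pos hs, if_pos hs]; exact ihl accq accc
            · rw [if_neg hs, if_neg hs]
              have e1 : accq.map (pvRn f) ++ [pvRn f na.1] = (accq ++ [na.1]).map (pvRn f) := by
                simp
              have e2 : pvRnCf f accc ++ [(pvRn f na.1, some (pvRn f st, na.2))] =
                  pvRnCf f (accc ++ [(na.1, some (st, na.2))]) := by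
                simp [pvRnCf]
              rw [e1, e2]; exact ihl (accq ++ [na.1]) (accc ++ [(na.1, some (st, na.2))])
        rw [pvStSucc_rn f hd hm hw hf, hfold (pvStSucc st) rest cf]
        exact ih _ _

theorem bfs_rn (f : String → String) (hd : f "door" = "door") (hm : f "middle" = "middle")
    (hw : f "window" = "window") (hf : Function.Injective f)
    (st : String × String × String × Bool) : bfs (pvRn f st) = bfs st := by
  have := pvLoopA_rn f hd hm hw hf 1000 [(st, [])] []
  simpa [bfs] using this

theorem bfs_alt_rn (f : String → String) (hd : f "door" = "door") (hm : f "middle" = "middle")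
    (hw : f "window" = "window") (hf : Function.Injective f)
    (st : String × String × String × Bool) : bfs_alt (pvRn f st) = bfs_alt st := by
  have := pvLoopB_rn f hd hm hw hf 1000 [st] [(st, none)]
  simpa [bfs_alt, pvRnCf] using this

-- the transposition a ↔ b on strings
def pvSwap (a b : String) : String → String :=
  fun s => if s = a then b else if s = b then a else s

theorem pvSwap_invol (a b : String) : Function.Involutive (pvSwap a b) := by
  intro x
  by_cases h1 : x = a
  · by_cases h2 : b = a <;> simp [pvSwap, h1, h2]
  · by_cases h2 : x = b <;> simp [pvSwap, h1, h2]

theorem pvSwap_inj (a b : String) : Function.Injective (pvSwap a b) :=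
  (pvSwap_invol a b).injective

theorem pvSwap_fix {a b x : String} (h1 : x ≠ a) (h2 : x ≠ b) : pvSwap a b x = x := by
  simp [pvSwap, h1, h2]

-- reduce the goal at st to the goal at the renamed state, for a transposition a ↔ b
-- where neither a nor b is one of the three location literals
theorem pvReduce (a b : String) (ha1 : a ≠ "door") (ha2 : a ≠ "middle") (ha3 : a ≠ "window")
    (hb1 : b ≠ "door") (hb2 : b ≠ "middle") (hb3 : b ≠ "window")
    (st : String × String × String × Bool)
    (h : bfs (pvRn (pvSwap a b) st) = bfs_alt (pvRn (pvSwap a b) st)) :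
    bfs st = bfs_alt st := by
  have hd : pvSwap a b "door" = "door" := pvSwap_fix (Ne.symm ha1) (Ne.symm hb1)
  have hm : pvSwap a b "middle" = "middle" := pvSwap_fix (Ne.symm ha2) (Ne.symm hb2)
  have hw : pvSwap a b "window" = "window" := pvSwap_fix (Ne.symm ha3) (Ne.symm hb3)
  rw [← bfs_rn (pvSwap a b) hd hm hw (pvSwap_inj a b) st,
      ← bfs_alt_rn (pvSwap a b) hd hm hw (pvSwap_inj a b) st, h]

theorem pvCanonPos (x : String) :
    x = "door" ∨ x = "middle" ∨ x = "window" ∨ (x ≠ "door" ∧ x ≠ "middle" ∧ x ≠ "window") := by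
  tauto

theorem pvKey (st : String × String × String × Bool) : bfs st = bfs_alt st := by
  obtain ⟨mp, mh, bp, hb⟩ := st
  cases hb with
  | true =>
    simp [bfs, bfs_alt, pvLoopA, pvLoopB, pvStGoal, pvBacktrack, pvCfGet]
  | false =>
    by_cases hm1 : mh = "on_floor"
    · subst hm1
      rcases pvCanonPos mp with hp | hp | hp | ⟨hp1, hp2, hp3⟩
      -- mp is one of the three literals
      · subst hp
        rcases pvCanonPos bp with hq | hq | hq | ⟨hq1, hq2, hq3⟩
        · subst hq; decide
        · subst hq; decide
        · subst hq; decide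
        · apply pvReduce bp "?" hq1 hq2 hq3 (by decide) (by decide) (by decide)
          rw [show pvRn (pvSwap bp "?") ("door", "on_floor", bp, false) =
              ("door", "on_floor", "?", false) from by
            simp [pvRn, pvSwap, Ne.symm hq1]]
          decide
      · subst hp
        rcases pvCanonPos bp with hq | hq | hq | ⟨hq1, hq2, hq3⟩
        · subst hq; decide
        · subst hq; decide
        · subst hq; decide
        · apply pvReduce bp "?" hq1 hq2 hq3 (by decide) (by decide) (by decide)
          rw [show pvRn (pvSwap bp "?") ("middle", "on_floor", bp, false) =
              ("middle", "on_floor", "?", false) from by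
            simp [pvRn, pvSwap, Ne.symm hq2]]
          decide
      · subst hp
        rcases pvCanonPos bp with hq | hq | hq | ⟨hq1, hq2, hq3⟩
        · subst hq; decide
        · subst hq; decide
        · subst hq; decide
        · apply pvReduce bp "?" hq1 hq2 hq3 (by decide) (by decide) (by decide)
          rw [show pvRn (pvSwap bp "?") ("window", "on_floor", bp, false) =
              ("window", "on_floor", "?", false) from by
            simp [pvRn, pvSwap, Ne.symm hq3]]
          decide
      -- mp is not a literal
      · rcases pvCanonPos bp with hq | hq | hq | ⟨hq1, hq2, hq3⟩
        · subst hq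
          apply pvReduce mp "!" hp1 hp2 hp3 (by decide) (by decide) (by decide)
          rw [show pvRn (pvSwap mp "!") (mp, "on_floor", "door", false) =
              ("!", "on_floor", "door", false) from by
            simp [pvRn, pvSwap, Ne.symm hp1]]
          decide
        · subst hq
          apply pvReduce mp "!" hp1 hp2 hp3 (by decide) (by decide) (by decide)
          rw [show pvRn (pvSwap mp "!") (mp, "on_floor", "middle", false) =
              ("!", "on_floor", "middle", false) from by
            simp [pvRn, pvSwap, Ne.symm hp2]]
          decide
        · subst hq
          apply pvReduce mp "!" hp1 hp2 hp3 (by decide) (by decide) (by decide)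
          rw [show pvRn (pvSwap mp "!") (mp, "on_floor", "window", false) =
              ("!", "on_floor", "window", false) from by
            simp [pvRn, pvSwap, Ne.symm hp3]]
          decide
        -- both positions non-literal
        · by_cases heq : mp = bp
          · subst heq
            apply pvReduce mp "!" hp1 hp2 hp3 (by decide) (by decide) (by decide)
            rw [show pvRn (pvSwap mp "!") (mp, "on_floor", mp, false) =
                ("!", "on_floor", "!", false) from by simp [pvRn, pvSwap]]
            decide
          · by_cases hbang : bp = "!"
            · subst hbang
              apply pvReduce mp "?" hp1 hp2 hp3 (by decide) (by decide) (by decide)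
              rw [show pvRn (pvSwap mp "?") (mp, "on_floor", "!", false) =
                  ("?", "on_floor", "!", false) from by
                simp [pvRn, pvSwap, Ne.symm heq]]
              decide
            · apply pvReduce mp "!" hp1 hp2 hp3 (by decide) (by decide) (by decide)
              rw [show pvRn (pvSwap mp "!") (mp, "on_floor", bp, false) =
                  ("!", "on_floor", bp, false) from by
                simp [pvRn, pvSwap, Ne.symm heq, hbang]]
              apply pvReduce bp "?" hq1 hq2 hq3 (by decide) (by decide) (by decide)
              rw [show pvRn (pvSwap bp "?") ("!", "on_floor", bp, false) =
                  ("!", "on_floor", "?", false) from by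
                simp [pvRn, pvSwap, Ne.symm hbang]]
              decide
    · by_cases hm2 : mh = "on_box"
      · subst hm2
        by_cases hpm : mp = "middle"
        · subst hpm
          simp [bfs, bfs_alt, pvLoopA, pvLoopB, pvStGoal, pvStSucc, pvBacktrack, pvCfGet]
        · simp [bfs, bfs_alt, pvLoopA, pvLoopB, pvStGoal, pvStSucc, hpm]
      · simp [bfs, bfs_alt, pvLoopA, pvLoopB, pvStGoal, pvStSucc, hm1, hm2]

-- ===== VERDICT (by name: the statement is the Claim_ definition above) =====
theorem bfs_spec : Claim_equal_bfs := by
  intro init_st _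
  unfold Spec_bfs
  exact pvKey init_st
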